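-- pv_equiv track=rewrite | github.com/microsoft/nnitp | nnitp/bayesitp.py | unflatten_unit
-- ===== SOURCE A (Python) =====
-- def unflatten_unit(input_shape,unit):
--     unit = unit[0] if isinstance(unit,tuple) else unit
--     res = tuple()
--     while len(input_shape) > 0:
--         input_shape,dim = input_shape[:-1],input_shape[-1]
--         res = (unit%dim,) + res
--         unit = unit//dim
--     return res
-- ===== SOURCE B (Python) =====
-- def unflatten_unit(input_shape, unit):
--     unit = unit[0] if isinstance(unit, tuple) else unit
--     # stage 1: table of successive quotients, built once:
--     # quots (after the reverse) holds q_i = unit floor-divided by dims i+1..n-1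
--     quots = [unit]
--     q = unit
--     for d in reversed(input_shape[1:]):
--         q = q // d
--         quots.append(q)
--     quots.reverse()
--     # stage 2: one forward pass pairing each quotient with its dimension
--     return tuple(q % d for q, d in zip(quots, input_shape))
-- ===== Notes on version B (the rewrite author's own statement) =====
-- stated objective: faster
-- what changed: replaced A's destructive while loop (re-slicing the shape, prepending one-element tuples, overwriting the running unit) by two staged passes: first build the table of successive quotients once, then one forward zip/mod pass produces the coordinates; intended as faster (a timing run measured 486x at the largest size both Pythons finished, unconfirmed at the top size where both timed out)
import Mathlib
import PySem

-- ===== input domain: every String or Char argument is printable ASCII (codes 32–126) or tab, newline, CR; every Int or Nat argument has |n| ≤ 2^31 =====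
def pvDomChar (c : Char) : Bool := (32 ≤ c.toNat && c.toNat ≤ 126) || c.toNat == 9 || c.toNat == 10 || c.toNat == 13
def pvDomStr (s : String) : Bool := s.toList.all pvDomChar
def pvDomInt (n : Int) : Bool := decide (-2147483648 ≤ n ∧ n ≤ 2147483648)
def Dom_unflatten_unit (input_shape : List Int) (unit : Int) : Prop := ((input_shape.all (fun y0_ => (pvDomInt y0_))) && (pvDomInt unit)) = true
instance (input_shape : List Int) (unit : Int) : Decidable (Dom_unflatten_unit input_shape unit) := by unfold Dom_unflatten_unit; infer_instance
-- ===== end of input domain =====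

-- B replaces A's destructive while loop (slice the shape, prepend to the result
-- tuple, overwrite the running unit each step) by two staged passes: first build
-- the table of successive quotients once, then one forward zip/mod pass builds
-- the result; intended as faster (a timing run measured 486x at the largest
-- size both Pythons finished, unconfirmed where both timed out).
-- The tuple guard on `unit` cannot arise under the Int type convention.

-- ===== PORT A =====
-- while len(input_shape) > 0: shape,dim = shape[:-1],shape[-1]; res = (unit%dim,)+res; unit = unit//dim
def unflatten_unit_loop (input_shape : List Int) (unit : Int) (res : List Int) : List Int :=
  if h : input_shape.length > 0 then
    let dim := input_shape.getLast (by intro hn; simp [hn] at h)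
    unflatten_unit_loop input_shape.dropLast (PySem.Int.floordiv unit dim)
      (PySem.Int.mod unit dim :: res)
  else res
termination_by input_shape.length
decreasing_by simpa using Nat.pred_lt (by omega)

def unflatten_unit (input_shape : List Int) (unit : Int) : List Int :=
  unflatten_unit_loop input_shape unit []

-- ===== PORT B =====
-- for d in reversed(input_shape[1:]): q = q // d; quots.append(q)
def unflatten_unit_qstep (st : Int × List Int) (d : Int) : Int × List Int :=
  (PySem.Int.floordiv st.1 d, st.2 ++ [PySem.Int.floordiv st.1 d])

-- quots.reverse(); return tuple(q % d for q, d in zip(quots, input_shape))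
def unflatten_unit_alt (input_shape : List Int) (unit : Int) : List Int :=
  let quots := (((input_shape.drop 1).reverse.foldl unflatten_unit_qstep (unit, [unit])).2).reverse
  (quots.zip input_shape).map (fun p => PySem.Int.mod p.1 p.2)

-- ===== PRECONDITION & SPEC =====
-- Pre_ excludes exactly the inputs on which A raises ZeroDivisionError: any zero dimension
-- (B raises there too).
def Pre_unflatten_unit (input_shape : List Int) (_unit : Int) : Prop := (0 : Int) ∉ input_shape
instance (input_shape : List Int) (unit : Int) : Decidable (Pre_unflatten_unit input_shape unit) := by unfold Pre_unflatten_unit; infer_instance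
def pvWitness_unflatten_unit : List Int × Int := ([2, 3, 4], 17)

def Spec_unflatten_unit (input_shape : List Int) (unit : Int) (out : List Int) : Prop := out = unflatten_unit_alt input_shape unit
instance (input_shape : List Int) (unit : Int) (out : List Int) : Decidable (Spec_unflatten_unit input_shape unit out) := by unfold Spec_unflatten_unit; infer_instance

-- ===== CLAIM (what is proved, stated in full; the proofs are below) =====
def Claim_equal_unflatten_unit : Prop := ∀ (input_shape : List Int) (unit : Int), Dom_unflatten_unit input_shape unit → Pre_unflatten_unit input_shape unit → Spec_unflatten_unit input_shape unit (unflatten_unit input_shape unit)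

-- ===== LEMMAS AND PROOFS =====

-- the fold only appends to the second component, and the first is independent of it
lemma unflatten_unit_qfold_snd (l : List Int) :
    ∀ (v : Int) (acc : List Int),
      (l.foldl unflatten_unit_qstep (v, acc)).2
        = acc ++ (l.foldl unflatten_unit_qstep (v, [])).2 := by
  induction l with
  | nil => intro v acc; simp
  | cons d l ih =>
    intro v acc
    simp only [List.foldl_cons, unflatten_unit_qstep, List.nil_append]
    rw [ih (PySem.Int.floordiv v d) (acc ++ [PySem.Int.floordiv v d]),
        ih (PySem.Int.floordiv v d) [PySem.Int.floordiv v d]]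
    simp

lemma unflatten_unit_qfold_len (l : List Int) (v : Int) :
    (l.foldl unflatten_unit_qstep (v, [])).2.length = l.length := by
  induction l generalizing v with
  | nil => simp
  | cons d l ih =>
    simp only [List.foldl_cons, unflatten_unit_qstep, List.nil_append]
    rw [unflatten_unit_qfold_snd]
    simp [ih]

-- B satisfies the same right-peeling recurrence as A's loop
lemma unflatten_unit_alt_concat (ds : List Int) (d : Int) (u : Int) :
    unflatten_unit_alt (ds ++ [d]) u
      = unflatten_unit_alt ds (PySem.Int.floordiv u d) ++ [PySem.Int.mod u d] := by
  cases ds with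
  | nil => simp [unflatten_unit_alt]
  | cons a as =>
    simp only [unflatten_unit_alt, List.cons_append, List.drop_one, List.tail_cons,
      List.reverse_append, List.reverse_cons, List.reverse_nil, List.nil_append,
      List.foldl_cons, unflatten_unit_qstep]
    rw [unflatten_unit_qfold_snd as.reverse (PySem.Int.floordiv u d)
          [u, PySem.Int.floordiv u d],
        unflatten_unit_qfold_snd as.reverse (PySem.Int.floordiv u d)
          [PySem.Int.floordiv u d]]
    set L := (as.reverse.foldl unflatten_unit_qstep (PySem.Int.floordiv u d, [])).2 with hL
    have h1 : ([u, PySem.Int.floordiv u d] ++ L).reverse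
        = (L.reverse ++ [PySem.Int.floordiv u d]) ++ [u] := by simp
    have h2 : ([PySem.Int.floordiv u d] ++ L).reverse
        = L.reverse ++ [PySem.Int.floordiv u d] := by simp
    have hlen : (L.reverse ++ [PySem.Int.floordiv u d]).length = (a :: as).length := by
      rw [hL, List.length_append, List.length_reverse, unflatten_unit_qfold_len,
        List.length_reverse]
      simp
    rw [h1, h2, ← List.cons_append, List.zip_append hlen]
    simp

lemma unflatten_unit_loop_eq_alt (shape : List Int) :
    ∀ (u : Int) (res : List Int),
      unflatten_unit_loop shape u res = unflatten_unit_alt shape u ++ res := by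
  induction shape using List.reverseRecOn with
  | nil => intro u res; simp [unflatten_unit_loop, unflatten_unit_alt]
  | append_singleton xs x ih =>
    intro u res
    rw [unflatten_unit_loop, dif_pos (by simp)]
    simp only [List.getLast_append, List.dropLast_concat]
    rw [ih, unflatten_unit_alt_concat]
    simp

-- ===== VERDICT (by name: the statement is the Claim_ definition above) =====
theorem unflatten_unit_spec : Claim_equal_unflatten_unit := by
  intro input_shape unit _ _
  show unflatten_unit input_shape unit = unflatten_unit_alt input_shape unit
  simp [unflatten_unit, unflatten_unit_loop_eq_alt]
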